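-- pv_equiv track=rewrite | github.com/Gukdoli/Coding_Test | 프로그래머스/1/82612. 부족한 금액 계산하기/부족한 금액 계산하기.py | solution
-- ===== SOURCE A (Python) =====
-- def solution(price, money, count):
--     answer = 0
--     a = 0
--     if count == 1:
--         if money >= price:
--             return 0
--         else:
--             answer = money - price
--     else:
--         for i in range(1,count+1):
--             a += price*i
--         if money >= a:
--                 return 0
--         else:
--             answer = money - a
--
--
--     return abs(answer)
-- ===== SOURCE B (Python) =====
-- def solution(price, money, count):
--     total = price * count * (count + 1) // 2
--     return max(0, total - money)
-- ===== Notes on version B (the rewrite author's own statement) =====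
-- stated objective: faster
-- what changed: Replaces A's O(count) loop summing price*i with the closed-form arithmetic series price*count*(count+1)//2 and a single max(0, total-money).
-- outside the precondition, e.g. on solution(3, 1, -2): A returns 0, B returns 2
import Mathlib
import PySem

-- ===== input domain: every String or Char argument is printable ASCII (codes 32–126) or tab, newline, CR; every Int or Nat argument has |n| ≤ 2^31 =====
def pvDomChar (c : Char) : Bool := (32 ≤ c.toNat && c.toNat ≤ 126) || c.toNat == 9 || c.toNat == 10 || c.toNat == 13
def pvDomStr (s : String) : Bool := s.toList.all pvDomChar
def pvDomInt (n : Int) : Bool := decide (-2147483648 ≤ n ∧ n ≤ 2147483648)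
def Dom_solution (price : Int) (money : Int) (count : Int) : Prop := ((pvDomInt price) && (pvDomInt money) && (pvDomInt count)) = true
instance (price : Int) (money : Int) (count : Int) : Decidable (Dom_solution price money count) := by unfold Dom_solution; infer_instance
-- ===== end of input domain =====

-- B replaces A's O(count) summing loop with the closed-form arithmetic series (measurably faster, asymptotic).


-- ===== PORT A =====
def solution (price : Int) (money : Int) (count : Int) : Int :=
  if count = 1 then
    if money ≥ price then 0 else |money - price|
  else
    let a := (PySem.List.pyRange 1 (count + 1) 1).foldl (fun acc i => acc + price * i) 0
    if money ≥ a then 0 else |money - a|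

-- ===== PORT B =====
def solution_alt (price : Int) (money : Int) (count : Int) : Int :=
  max 0 (PySem.Int.floordiv (price * count * (count + 1)) 2 - money)

-- ===== PRECONDITION & SPEC =====
-- Pre_ excludes count ≤ -2 (negative ride counts, outside the problem's natural domain of count ≥ 1),
-- where A's empty range(1, count+1) makes the sum 0 while B's arithmetic-series formula does not apply.
def Pre_solution (price : Int) (money : Int) (count : Int) : Prop := -1 ≤ count
instance (price : Int) (money : Int) (count : Int) : Decidable (Pre_solution price money count) := by unfold Pre_solution; infer_instance
def pvWitness_solution : Int × Int × Int := (3, 20, 4)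
def Spec_solution (price : Int) (money : Int) (count : Int) (out : Int) : Prop := out = solution_alt price money count
instance (price : Int) (money : Int) (count : Int) (out : Int) : Decidable (Spec_solution price money count out) := by unfold Spec_solution; infer_instance

-- ===== CLAIM (what is proved, stated in full; the proofs are below) =====
def Claim_equal_solution : Prop := ∀ (price : Int) (money : Int) (count : Int), Dom_solution price money count → Pre_solution price money count → Spec_solution price money count (solution price money count)

-- ===== LEMMAS AND PROOFS =====

-- A's loop sum, doubled, equals price*n*(n+1) for every natural n.
lemma loop_sum (price : Int) (n : Nat) :
    2 * (PySem.List.pyRange 1 ((n : Int) + 1) 1).foldl (fun acc i => acc + price * i) 0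
      = price * n * (n + 1) := by
  induction n with
  | zero => simp [PySem.List.pyRange_one_eq_nil]
  | succ m ih =>
      rw [show ((m + 1 : Nat) : Int) + 1 = ((m : Int) + 1) + 1 by push_cast; ring,
          PySem.List.pyRange_one_succ_right (by omega), List.foldl_append]
      simp only [List.foldl_cons, List.foldl_nil]
      push_cast
      ring_nf
      ring_nf at ih
      omega

-- the shared final branch: "0 if money ≥ a else |money - a|" is max 0 (a - money)
lemma branch_eq (money a : Int) :
    (if money ≥ a then (0 : Int) else |money - a|) = max 0 (a - money) := by
  by_cases h : a ≤ money
  · rw [if_pos h]; omega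
  · rw [if_neg (by omega), abs_of_neg (by omega : money - a < 0)]
    omega

lemma closed_form (price money count : Int) (h : -1 ≤ count) :
    solution price money count = solution_alt price money count := by
  have key : ∀ a : Int, 2 * a = price * count * (count + 1) →
      (if money ≥ a then (0 : Int) else |money - a|) = solution_alt price money count := by
    intro a ha
    rw [branch_eq, solution_alt, PySem.Int.floordiv, ← ha,
        Int.mul_fdiv_cancel_left a (by norm_num : (2 : Int) ≠ 0)]
  by_cases hc : count = 1
  · subst hc
    rw [solution, if_pos rfl, key price (by ring)]
  · rw [solution, if_neg hc]
    by_cases h1 : count = -1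
    · -- count = -1 : empty range, sum 0
      subst h1
      rw [show (-1 : Int) + 1 = 0 by ring, PySem.List.pyRange_one_eq_nil (by omega)]
      exact key 0 (by ring)
    · -- count ≥ 0
      obtain ⟨n, rfl⟩ : ∃ n : Nat, count = (n : Int) :=
        ⟨count.toNat, (Int.toNat_of_nonneg (by omega)).symm⟩
      exact key _ (loop_sum price n)

-- ===== VERDICT (by name: the statement is the Claim_ definition above) =====
theorem solution_spec : Claim_equal_solution := by
  intro price money count _ hpre
  exact closed_form price money count hpre
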